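-- pv_equiv track=rewrite | github.com/nikolamilosevic86/verifAI | backend/verification.py | verification_format
-- ===== SOURCE A (Python) =====
-- def verification_format(claims:list) -> [ [str, list] ]:
--     """
--     param:
--     claims: list of claim for each pmid
--
--     return:
--     it returns a list where each element is composed by [claim, [pmid1,pmid2]]
--     in order to manage better the situation with the front end part
--     """
--
--     if claims == []:
--         return []
--
--     pmid, claim = claims[0]
--     output_format = [[claim, [pmid]]]
--     for pmid, claim in claims[1:]:
--         if claim == output_format[-1][0]: # check if the claim is present
--             output_format[-1][1].append(pmid)
--         else:
--             output_format.append([claim, [pmid]])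
--
--     return output_format
-- ===== SOURCE B (Python) =====
-- def verification_format(claims: list) -> [[str, list]]:
--     out = []
--     i, n = 0, len(claims)
--     while i < n:
--         claim = claims[i][1]
--         j = i
--         while j < n and claims[j][1] == claim:
--             j += 1
--         out.append([claim, [pmid for pmid, _ in claims[i:j]]])
--         i = j
--     return out
-- ===== Notes on version B (the rewrite author's own statement) =====
-- stated objective: alternative
-- what changed: Replaced A's per-element state machine that mutates the last group via output_format[-1] lookback with an index-based run peeler: an inner loop scans ahead to find the end of each maximal run of equal claims, then the whole group is built at once from the slice claims[i:j].
import Mathlib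
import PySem

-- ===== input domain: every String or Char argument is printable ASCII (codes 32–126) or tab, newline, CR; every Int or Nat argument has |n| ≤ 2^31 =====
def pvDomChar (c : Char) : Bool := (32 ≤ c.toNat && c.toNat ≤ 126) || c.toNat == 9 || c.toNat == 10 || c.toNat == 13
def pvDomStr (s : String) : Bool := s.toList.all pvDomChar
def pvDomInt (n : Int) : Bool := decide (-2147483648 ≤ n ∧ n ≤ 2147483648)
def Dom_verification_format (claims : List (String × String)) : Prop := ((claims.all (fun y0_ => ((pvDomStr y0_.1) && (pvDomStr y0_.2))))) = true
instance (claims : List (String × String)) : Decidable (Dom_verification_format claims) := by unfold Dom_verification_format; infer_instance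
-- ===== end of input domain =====

-- B replaces A's lookback state machine (mutating output_format[-1]) with an index-based run
-- peeler: an inner scan finds each run's end, the group is built at once from a slice (objective: alternative).


-- ===== PORT A =====
-- one loop step of A: look at output_format[-1], append pmid to it or start a new group
def vfStep (out : List (String × List String)) (pc : String × String) :
    List (String × List String) :=
  match out.getLast? with
  | some (c, ps) =>
      if pc.2 == c then out.dropLast ++ [(c, ps ++ [pc.1])]
      else out ++ [(pc.2, [pc.1])]
  | none => out

def verification_format (claims : List (String × String)) : List (String × List String) :=
  match claims with
  | [] => []
  | (pmid, claim) :: rest => rest.foldl vfStep [(claim, [pmid])]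

-- ===== PORT B =====
-- inner while loop: 'while j < n and claims[j][1] == claim: j += 1'
-- (the 'j < n' guard keeps the index in range, so List.getD is exact for claims[j] here)
def vfScanEnd (claims : List (String × String)) (n : Nat) (c : String) (j : Nat) : Nat :=
  if j < n ∧ ((claims.getD j ("", "")).2 == c) = true then vfScanEnd claims n c (j + 1) else j
termination_by n - j

-- cited by the outer loop's decreasing_by: the scan never moves left, and moves right at least once
-- when the entry condition holds
theorem le_vfScanEnd (claims : List (String × String)) (n : Nat) (c : String) (j : Nat) :
    j ≤ vfScanEnd claims n c j := by
  unfold vfScanEnd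
  split
  · exact Nat.le_trans (Nat.le_succ j) (le_vfScanEnd claims n c (j + 1))
  · exact Nat.le_refl j
termination_by n - j

theorem lt_vfScanEnd_self (claims : List (String × String)) (n : Nat) (i : Nat) (hi : i < n) :
    i < vfScanEnd claims n ((claims.getD i ("", "")).2) i := by
  rw [vfScanEnd]
  simp only [hi, true_and, beq_self_eq_true, if_pos]
  exact Nat.lt_of_lt_of_le (Nat.lt_succ_self i) (le_vfScanEnd claims n _ (i + 1))

-- outer while loop: 'while i < n: claim = claims[i][1]; scan j; out.append([claim, slice]); i = j'
def vfOuter (claims : List (String × String)) (n : Nat) (i : Nat) : List (String × List String) :=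
  if h : i < n then
    let c := (claims.getD i ("", "")).2
    let j := vfScanEnd claims n c i
    (c, (PySem.List.slice claims (some (i : Int)) (some (j : Int))).map Prod.fst)
      :: vfOuter claims n j
  else []
termination_by n - i
decreasing_by
  have := lt_vfScanEnd_self claims n i h
  omega

def verification_format_alt (claims : List (String × String)) : List (String × List String) :=
  vfOuter claims claims.length 0

-- ===== PRECONDITION & SPEC =====
def Spec_verification_format (claims : List (String × String)) (out : List (String × List String)) : Prop := out = verification_format_alt claims
instance (claims : List (String × String)) (out : List (String × List String)) : Decidable (Spec_verification_format claims out) := by unfold Spec_verification_format; infer_instance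

-- ===== CLAIM (what is proved, stated in full; the proofs are below) =====
def Claim_equal_verification_format : Prop := ∀ (claims : List (String × String)), Dom_verification_format claims → Spec_verification_format claims (verification_format claims)

-- ===== LEMMAS AND PROOFS =====

-- common reference form: maximal runs peeled by takeWhile/dropWhile
def vfGroups : List (String × String) → List (String × List String)
  | [] => []
  | (p, c) :: rest =>
      (c, p :: (rest.takeWhile (fun pc => pc.2 == c)).map Prod.fst)
        :: vfGroups (rest.dropWhile (fun pc => pc.2 == c))
termination_by xs => xs.length
decreasing_by
  simpa using Nat.lt_succ_of_le (List.length_dropWhile_le _ _)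

-- A's loop, abstracted: the open current group (c, ps) being extended over rest
def vfAux (c : String) (ps : List String) : List (String × String) → List (String × List String)
  | [] => [(c, ps)]
  | (p, c') :: rest =>
      if c' == c then vfAux c (ps ++ [p]) rest
      else (c, ps) :: vfAux c' [p] rest

theorem vfStep_concat (acc : List (String × List String)) (c : String) (ps : List String)
    (pc : String × String) :
    vfStep (acc ++ [(c, ps)]) pc =
      if pc.2 == c then acc ++ [(c, ps ++ [pc.1])]
      else (acc ++ [(c, ps)]) ++ [(pc.2, [pc.1])] := by
  simp [vfStep]

theorem foldl_vfStep_eq_vfAux (rest : List (String × String))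
    (acc : List (String × List String)) (c : String) (ps : List String) :
    List.foldl vfStep (acc ++ [(c, ps)]) rest = acc ++ vfAux c ps rest := by
  induction rest generalizing acc c ps with
  | nil => simp [vfAux]
  | cons pc rest ih =>
      obtain ⟨p, c'⟩ := pc
      simp only [List.foldl_cons, vfStep_concat]
      by_cases h : c' == c
      · simp [vfAux, h, ih]
      · simp only [vfAux, h, Bool.false_eq_true, reduceIte]
        rw [ih (acc ++ [(c, ps)]) c' [p]]
        simp

theorem vfAux_eq_groups (rest : List (String × String)) (c : String) (ps : List String) :
    vfAux c ps rest =
      (c, ps ++ (rest.takeWhile (fun pc => pc.2 == c)).map Prod.fst)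
        :: vfGroups (rest.dropWhile (fun pc => pc.2 == c)) := by
  induction rest generalizing c ps with
  | nil => simp [vfAux, vfGroups]
  | cons pc rest ih =>
      obtain ⟨p, c'⟩ := pc
      by_cases h : c' == c
      · have hc : c' = c := by simpa using h
        subst hc
        simp [vfAux, ih]
      · simp [vfAux, h, ih, vfGroups]

-- take (length of takeWhile) recovers takeWhile
theorem take_length_takeWhile {α : Type} (f : α → Bool) (xs : List α) :
    xs.take (xs.takeWhile f).length = xs.takeWhile f := by
  induction xs with
  | nil => simp
  | cons x xs ih =>
      by_cases h : f x
      · simp [h, ih]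
      · simp [h]

theorem dropWhile_eq_drop {α : Type} (f : α → Bool) (xs : List α) :
    xs.dropWhile f = xs.drop (xs.takeWhile f).length := by
  induction xs with
  | nil => simp
  | cons x xs ih =>
      by_cases h : f x
      · simp [h, ih]
      · simp [h]

-- the inner scan computes j + (length of the run of claim c starting at j)
theorem vfScanEnd_eq (claims : List (String × String)) (c : String) (j : Nat) :
    vfScanEnd claims claims.length c j =
      j + ((claims.drop j).takeWhile (fun pc => pc.2 == c)).length := by
  rw [vfScanEnd]
  by_cases h : j < claims.length
  · have hdrop : claims.drop j = claims[j] :: claims.drop (j + 1) :=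
      List.drop_eq_getElem_cons h
    have hgd : claims.getD j ("", "") = claims[j] := List.getD_eq_getElem claims _ h
    by_cases hc : (claims[j].2 == c) = true
    · simp only [h, hgd, hc, and_self, if_pos]
      rw [vfScanEnd_eq claims c (j + 1), hdrop, List.takeWhile_cons, hc]
      simp
      omega
    · simp only [h, hgd, hc, true_and, if_neg, Bool.false_eq_true, not_false_eq_true]
      rw [hdrop, List.takeWhile_cons]
      simp [hc]
  · have : claims.drop j = [] := List.drop_eq_nil_of_le (by omega)
    simp [h, this]
termination_by claims.length - j

theorem vfOuter_eq_groups (claims : List (String × String)) (i : Nat) :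
    vfOuter claims claims.length i = vfGroups (claims.drop i) := by
  rw [vfOuter]
  by_cases h : i < claims.length
  · have hdrop : claims.drop i = claims[i] :: claims.drop (i + 1) :=
      List.drop_eq_getElem_cons h
    have hgd : claims.getD i ("", "") = claims[i] := List.getD_eq_getElem claims _ h
    set c := claims[i].2 with hc
    have hscan : vfScanEnd claims claims.length c i =
        i + 1 + ((claims.drop (i + 1)).takeWhile (fun pc => pc.2 == c)).length := by
      rw [vfScanEnd_eq, hdrop, List.takeWhile_cons]
      simp [← hc]
      omega
    simp only [h, dif_pos, hgd]
    rw [hscan]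
    have hslice : PySem.List.slice claims (some (i : Int))
          (some ((i + 1 + ((claims.drop (i + 1)).takeWhile (fun pc => pc.2 == c)).length : Nat) : Int)) =
        (claims.drop i).take
          (1 + ((claims.drop (i + 1)).takeWhile (fun pc => pc.2 == c)).length) := by
      rw [PySem.List.slice_natCast]
      congr 1
      omega
    rw [hslice, hdrop, Nat.add_comm 1, List.take_succ_cons, take_length_takeWhile]
    have hrec : vfOuter claims claims.length
          (i + 1 + ((claims.drop (i + 1)).takeWhile (fun pc => pc.2 == c)).length) =
        vfGroups (claims.drop
          (i + 1 + ((claims.drop (i + 1)).takeWhile (fun pc => pc.2 == c)).length)) :=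
      vfOuter_eq_groups claims _
    rw [hrec]
    rw [vfGroups]
    congr 1
    rw [dropWhile_eq_drop]
    rw [← List.drop_drop]
  · have : claims.drop i = [] := List.drop_eq_nil_of_le (by omega)
    simp [h, this, vfGroups]
termination_by claims.length - i
decreasing_by
  have := lt_vfScanEnd_self claims claims.length i h
  rw [vfScanEnd_eq] at this
  omega

theorem alt_eq_groups (claims : List (String × String)) :
    verification_format_alt claims = vfGroups claims := by
  unfold verification_format_alt
  simpa using vfOuter_eq_groups claims 0

-- ===== VERDICT (by name: the statement is the Claim_ definition above) =====
theorem verification_format_spec : Claim_equal_verification_format := by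
  intro claims _
  unfold Spec_verification_format verification_format
  rw [alt_eq_groups]
  match claims with
  | [] => simp [vfGroups]
  | (p, c) :: rest =>
      have h := foldl_vfStep_eq_vfAux rest [] c [p]
      simp only [List.nil_append] at h
      simp only []
      rw [h, vfAux_eq_groups, vfGroups]
      simp
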